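-- pv_equiv track=rewrite | github.com/MSPigl/ComputerGraphics | Labs/Lab 2/Boggle.py | boggle
-- ===== SOURCE A (Python) =====
-- def boggle(arr):
-- 	score = 0
--
-- 	for element in range(0, len(arr)):
-- 		if len(arr[element]) <= 4:
-- 			score += 1
-- 		elif len(arr[element]) == 5:
-- 			score += 2
-- 		elif len(arr[element]) == 6:
-- 			score += 3
-- 		elif len(arr[element]) == 7:
-- 			score += 5
-- 		else:
-- 			score += 11
--
-- 	return score
-- ===== SOURCE B (Python) =====
-- _WEIGHTS = {4: 1, 5: 2, 6: 3, 7: 5, 8: 11}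
--
-- def boggle(arr):
--     # build a length-bucket histogram, then combine it as a weighted sum
--     buckets = [min(max(len(word), 4), 8) for word in arr]
--     counts = {}
--     for b in buckets:
--         counts[b] = counts.get(b, 0) + 1
--     return sum(_WEIGHTS[b] * c for b, c in counts.items())
-- ===== Notes on version B (the rewrite author's own statement) =====
-- stated objective: alternative
-- what changed: Replaces the running branch-accumulator with a build-table-then-combine shape: one pass clamps each word length into a bucket and builds a frequency dict, then the score is a weighted sum over the histogram's items.
import Mathlib
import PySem

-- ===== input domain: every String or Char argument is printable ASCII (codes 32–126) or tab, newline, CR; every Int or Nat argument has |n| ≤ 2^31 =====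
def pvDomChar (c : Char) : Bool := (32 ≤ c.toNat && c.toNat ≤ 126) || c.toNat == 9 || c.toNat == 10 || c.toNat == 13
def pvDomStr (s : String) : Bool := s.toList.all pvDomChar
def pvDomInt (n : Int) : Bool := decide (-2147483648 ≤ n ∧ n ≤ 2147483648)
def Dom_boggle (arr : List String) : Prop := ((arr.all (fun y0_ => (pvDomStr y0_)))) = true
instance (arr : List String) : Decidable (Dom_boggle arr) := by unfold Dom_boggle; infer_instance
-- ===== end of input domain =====

-- B replaces A's running branch-accumulator by a length-bucket histogram (dict) combined as a
-- weighted sum over its items; same O(n) cost, different shape (objective: alternative).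

-- ===== PORT A =====
def boggle (arr : List String) : Int :=
  (PySem.List.pyRange 0 (PySem.List.len arr) 1).foldl
    (fun score element =>
      let word := PySem.List.pyGetD arr element ""   -- arr[element]; index always in range
      if PySem.Str.len word ≤ 4 then score + 1
      else if PySem.Str.len word = 5 then score + 2
      else if PySem.Str.len word = 6 then score + 3
      else if PySem.Str.len word = 7 then score + 5
      else score + 11) 0

-- ===== PORT B =====
def boggleWeights : PySem.Dict Int Int :=
  PySem.Dict.ofList [(4, 1), (5, 2), (6, 3), (7, 5), (8, 11)]

def boggle_alt (arr : List String) : Int :=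
  let buckets := arr.map (fun word => min (max (PySem.Str.len word) 4) 8)
  let counts := buckets.foldl (fun d b => d.insert b (d.getD b 0 + 1)) PySem.Dict.empty
  -- _WEIGHTS[b]: every bucket 4..8 is a key of boggleWeights, so the getD default 0 is never used
  counts.items.foldl (fun acc p => acc + boggleWeights.getD p.1 0 * p.2) 0

-- ===== PRECONDITION & SPEC =====
def Spec_boggle (arr : List String) (out : Int) : Prop := out = boggle_alt arr
instance (arr : List String) (out : Int) : Decidable (Spec_boggle arr out) := by unfold Spec_boggle; infer_instance

-- ===== CLAIM (what is proved, stated in full; the proofs are below) =====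
def Claim_equal_boggle : Prop := ∀ (arr : List String), Dom_boggle arr → Spec_boggle arr (boggle arr)

-- ===== LEMMAS AND PROOFS =====

-- A's per-word increment as a function of the word's length
def aScore (L : Int) : Int :=
  if L ≤ 4 then 1 else if L = 5 then 2 else if L = 6 then 3 else if L = 7 then 5 else 11

lemma boggle_foldl (arr : List String) (init : Int) :
    arr.foldl
      (fun score word =>
        if PySem.Str.len word ≤ 4 then score + 1
        else if PySem.Str.len word = 5 then score + 2
        else if PySem.Str.len word = 6 then score + 3
        else if PySem.Str.len word = 7 then score + 5
        else score + 11) init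
      = init + (arr.map (fun word => aScore (PySem.Str.len word))).sum := by
  induction arr generalizing init with
  | nil => simp
  | cons w ws ih =>
    simp only [List.foldl_cons, List.map_cons, List.sum_cons, ih, aScore]
    split_ifs <;> ring

-- summing a function weighted by counts over the distinct elements = summing it over the list
lemma sum_ofList_count (g : Int → Int) (bs : List Int) :
    ((PySem.Set.ofList bs).map (fun k => g k * bs.count k)).sum = (bs.map g).sum := by
  have hfin : ((PySem.Set.ofList bs : List Int)).toFinset = bs.toFinset := by
    ext x; simp [PySem.Set.mem_ofList]
  rw [← List.sum_toFinset _ (PySem.Set.nodup_ofList bs), hfin]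
  have := Finset.sum_multiset_map_count (bs : Multiset Int) g
  simp only [Multiset.map_coe, Multiset.sum_coe, Multiset.coe_count] at this
  rw [this]
  refine Finset.sum_congr rfl fun x _ => ?_
  push_cast [nsmul_eq_mul]
  ring

lemma weight_bucket (L : Int) :
    boggleWeights.getD (min (max L 4) 8) 0 = aScore L := by
  unfold aScore
  split_ifs with h1 h2 h3 h4
  · have : min (max L 4) 8 = 4 := by omega
    rw [this]; decide
  · have : min (max L 4) 8 = 5 := by omega
    rw [this]; decide
  · have : min (max L 4) 8 = 6 := by omega
    rw [this]; decide
  · have : min (max L 4) 8 = 7 := by omega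
    rw [this]; decide
  · have : min (max L 4) 8 = 8 := by omega
    rw [this]; decide

-- ===== VERDICT (by name: the statement is the Claim_ definition above) =====
theorem boggle_spec : Claim_equal_boggle := by
  intro arr _
  unfold Spec_boggle boggle boggle_alt
  simp only [PySem.List.len_eq]
  rw [PySem.List.foldl_pyRange_zero_pyGetD' arr ""
        (fun score word =>
          if PySem.Str.len word ≤ 4 then score + 1
          else if PySem.Str.len word = 5 then score + 2
          else if PySem.Str.len word = 6 then score + 3
          else if PySem.Str.len word = 7 then score + 5
          else score + 11) 0]
  rw [boggle_foldl, PySem.Dict.foldl_insert_getD_add_one_eq_counter]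
  simp only [PySem.List.foldl_add]
  rw [PySem.Dict.items_counter, List.map_map]
  simp only [Function.comp_def, zero_add]
  rw [sum_ofList_count (fun k => boggleWeights.getD k 0)]
  rw [List.map_map]
  congr 1
  refine List.map_congr_left fun w _ => ?_
  exact (weight_bucket (PySem.Str.len w)).symm
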